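-- pv_equiv track=rewrite | github.com/brilleta/Advent-Of-Code | 2023/aoc11.py | get_coords2
-- ===== SOURCE A (Python) =====
-- import typing as t
--
-- def get_coords2(univ: t.List[t.List[str]]) -> t.List[t.Tuple[int, int]]:
--     coords = []
--     for i in range(len(univ)):
--         for j in range(len(univ[i])):
--             if univ[i][j] == "#":
--                 coords.append(
--                     (
--                         i + [univ[x][j] for x in range(i)].count("E") * 999998,
--                         j + univ[i][:j].count("E") * 999998,
--                     )
--                 )
--     return coords
-- ===== SOURCE B (Python) =====
-- import typing as t
--
-- def get_coords2(univ: t.List[t.List[str]]) -> t.List[t.Tuple[int, int]]: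
--     coords = []
--     col_e = {}  # column j -> count of "E" cells in rows already processed
--     for i, row in enumerate(univ):
--         row_e = 0  # count of "E" cells seen so far in this row
--         for j, c in enumerate(row):
--             if c == "#":
--                 coords.append((i + col_e.get(j, 0) * 999998, j + row_e * 999998))
--             elif c == "E":
--                 row_e += 1
--         for j, c in enumerate(row):
--             if c == "E":
--                 col_e[j] = col_e.get(j, 0) + 1
--     return coords
-- ===== Notes on version B (the rewrite author's own statement) =====
-- stated objective: alternative
-- what changed: B makes a single pass keeping a running per-column dict of 'E' counts and a running per-row 'E' counter, so the per-cell rescans of the column above and of the row prefix disappear (asymptotically lighter, though not measurably faster on the sampled inputs).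
import Mathlib
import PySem

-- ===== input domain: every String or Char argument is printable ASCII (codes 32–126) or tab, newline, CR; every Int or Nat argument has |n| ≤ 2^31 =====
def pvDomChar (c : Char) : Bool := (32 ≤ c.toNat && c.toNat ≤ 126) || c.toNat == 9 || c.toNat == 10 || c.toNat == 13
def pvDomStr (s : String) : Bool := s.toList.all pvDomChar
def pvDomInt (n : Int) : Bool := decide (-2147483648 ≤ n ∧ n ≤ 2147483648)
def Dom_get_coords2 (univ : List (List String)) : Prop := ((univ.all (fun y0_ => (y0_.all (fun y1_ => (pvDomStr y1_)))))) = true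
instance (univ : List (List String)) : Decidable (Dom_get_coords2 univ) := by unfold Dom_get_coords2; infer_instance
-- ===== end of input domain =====

-- B makes a single pass with a running per-column dict of 'E' counts and a running per-row
-- 'E' counter instead of A's per-cell rescans of the column above and the row prefix (objective: alternative).

-- ===== PORT A =====
def get_coords2 (univ : List (List String)) : List (Int × Int) :=
  (List.range univ.length).foldl (fun coords i =>
    (List.range (univ.getD i []).length).foldl (fun coords j =>
      if (univ.getD i []).getD j "" = "#" then
        coords ++ [((i : Int) + (((List.range i).map (fun x => (univ.getD x []).getD j "")).count "E" : Int) * 999998,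
                    (j : Int) + (((univ.getD i []).take j).count "E" : Int) * 999998)]
      else coords) coords) []

-- ===== PORT B =====
def altInnerStep (i : Int) (d : PySem.Dict Int Int) (q : List (Int × Int) × Int) (jc : Int × String) :
    List (Int × Int) × Int :=
  if jc.2 = "#" then (q.1 ++ [(i + d.getD jc.1 0 * 999998, jc.1 + q.2 * 999998)], q.2)
  else if jc.2 = "E" then (q.1, q.2 + 1) else q

def altColStep (d : PySem.Dict Int Int) (jc : Int × String) : PySem.Dict Int Int :=
  if jc.2 = "E" then d.insert jc.1 (d.getD jc.1 0 + 1) else d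

def altRowStep (st : List (Int × Int) × PySem.Dict Int Int) (p : Int × List String) :
    List (Int × Int) × PySem.Dict Int Int :=
  (((PySem.List.enumerate p.2 0).foldl (altInnerStep p.1 st.2) (st.1, 0)).1,
   (PySem.List.enumerate p.2 0).foldl altColStep st.2)

def get_coords2_alt (univ : List (List String)) : List (Int × Int) :=
  ((PySem.List.enumerate univ 0).foldl altRowStep ([], PySem.Dict.empty)).1

-- ===== PRECONDITION & SPEC =====
-- Pre_ excludes exactly the ragged inputs on which Python A raises IndexError:
-- a '#' cell whose column index is out of range for some earlier (shorter) row.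
def Pre_get_coords2 (univ : List (List String)) : Prop :=
  ∀ i ∈ List.range univ.length, ∀ j ∈ List.range (univ.getD i []).length,
    (univ.getD i []).getD j "" = "#" → ∀ x ∈ List.range i, j < (univ.getD x []).length
instance (univ : List (List String)) : Decidable (Pre_get_coords2 univ) := by
  unfold Pre_get_coords2; infer_instance

def pvWitness_get_coords2 : List (List String) := [["#", "."], ["E", "#"]]

def Spec_get_coords2 (univ : List (List String)) (out : List (Int × Int)) : Prop := out = get_coords2_alt univ
instance (univ : List (List String)) (out : List (Int × Int)) : Decidable (Spec_get_coords2 univ out) := by unfold Spec_get_coords2; infer_instance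

-- ===== CLAIM (what is proved, stated in full; the proofs are below) =====
def Claim_equal_get_coords2 : Prop := ∀ (univ : List (List String)), Dom_get_coords2 univ → Pre_get_coords2 univ → Spec_get_coords2 univ (get_coords2 univ)


-- ===== LEMMAS AND PROOFS =====

/-- Common specification of one row's output: position `s`, running row 'E' count `e`. -/
def rowOutFrom (i : Int) (cnt : Nat → Int) : List String → Nat → Nat → List (Int × Int)
  | [], _, _ => []
  | c :: rest, s, e =>
      (if c = "#" then [(i + cnt s * 999998, (s : Int) + (e : Int) * 999998)] else []) ++
      rowOutFrom i cnt rest (s + 1) (e + if c = "E" then 1 else 0)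

/-- Column counts after absorbing one row. -/
def bump (cnt : Nat → Int) (r : List String) : Nat → Int :=
  fun j => cnt j + (if r.getD j "" = "E" then 1 else 0)

/-- Common specification of the whole result from row `k` on, `cnt` = column 'E' counts so far. -/
def specRows : (Nat → Int) → Int → List (List String) → List (Int × Int)
  | _, _, [] => []
  | cnt, k, r :: rest => rowOutFrom k cnt r 0 0 ++ specRows (bump cnt r) (k + 1) rest

theorem binner (r : List String) (i : Int) (d : PySem.Dict Int Int) :
    ∀ (s e : Nat) (coords : List (Int × Int)),
    (PySem.List.enumerate r (s : Int)).foldl (altInnerStep i d) (coords, (e : Int)) =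
      (coords ++ rowOutFrom i (fun n => d.getD (n : Int) 0) r s e, ((e + r.count "E" : Nat) : Int)) := by
  induction r with
  | nil => intro s e coords; simp [PySem.List.enumerate_nil, rowOutFrom]
  | cons c rest ih =>
    intro s e coords
    rw [PySem.List.enumerate_cons, List.foldl_cons]
    have hs1 : ((s : Int) + 1) = ((s + 1 : Nat) : Int) := by omega
    by_cases hc : c = "#"
    · subst hc
      simp only [altInnerStep, hs1, if_true, reduceIte]
      rw [ih (s + 1) e]
      simp [rowOutFrom, List.count_cons]
    · by_cases he : c = "E"
      · subst he
        simp only [altInnerStep, if_neg hc, reduceIte, hs1]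
        have he1 : ((e : Int) + 1) = ((e + 1 : Nat) : Int) := by omega
        rw [he1, ih (s + 1) (e + 1)]
        simp [rowOutFrom, List.count_cons]
        omega
      · simp only [altInnerStep, if_neg hc, if_neg he, hs1]
        rw [ih (s + 1) e]
        have hc' : (c == "#") = false := by simpa using hc
        have he' : (c == "E") = false := by simpa using he
        simp [rowOutFrom, List.count_cons, hc, he, hc', he']

theorem colupd (r : List String) :
    ∀ (s : Nat) (d : PySem.Dict Int Int) (q : Int),
    ((PySem.List.enumerate r (s : Int)).foldl altColStep d).getD q 0 =
      d.getD q 0 + (if (s : Int) ≤ q ∧ r.getD (q - s).toNat "" = "E" then 1 else 0) := by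
  induction r with
  | nil =>
    intro s d q
    simp [PySem.List.enumerate_nil, List.getD]
  | cons c rest ih =>
    intro s d q
    rw [PySem.List.enumerate_cons, List.foldl_cons]
    have hs1 : ((s : Int) + 1) = ((s + 1 : Nat) : Int) := by omega
    by_cases hc : c = "E"
    · subst hc
      simp only [altColStep, reduceIte, hs1]
      rw [ih (s + 1) (d.insert (s : Int) (d.getD (s : Int) 0 + 1)) q]
      rw [PySem.Dict.getD_insert]
      by_cases hq : q = (s : Int)
      · subst hq
        have h0 : (((s : Int)) - (s : Nat)).toNat = 0 := by omega
        rw [if_pos rfl, h0]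
        rw [if_neg (by omega), if_pos ⟨by omega, by simp [List.getD]⟩]
        omega
      · rw [if_neg hq]
        by_cases hle : (s : Int) + 1 ≤ q
        · have hn : (q - (s : Nat)).toNat = (q - ((s + 1 : Nat) : Int)).toNat + 1 := by omega
          rw [hn]
          simp only [List.getD_cons_succ]
          by_cases hE : rest.getD (q - ((s + 1 : Nat) : Int)).toNat "" = "E"
          · rw [if_pos ⟨by omega, hE⟩, if_pos ⟨by omega, hE⟩]
          · rw [if_neg (fun h => hE h.2), if_neg (fun h => hE h.2)]
        · have h1 : ¬ (((s + 1 : Nat) : Int) ≤ q ∧ rest.getD (q - ((s + 1 : Nat) : Int)).toNat "" = "E") := by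
            intro h; exact hle (by omega)
          have h2 : ¬ ((s : Int) ≤ q ∧ (("E" : String) :: rest).getD (q - (s : Nat)).toNat "" = "E") := by
            intro h
            have hlt : (s : Int) ≤ q := h.1
            have : q = (s : Int) := by omega
            exact hq this
          rw [if_neg h1, if_neg h2]
    · simp only [altColStep, if_neg hc, hs1]
      rw [ih (s + 1) d q]
      by_cases hq : q = (s : Int)
      · subst hq
        have h0 : (((s : Int)) - (s : Nat)).toNat = 0 := by omega
        rw [h0]
        have h1 : ¬ (((s + 1 : Nat) : Int) ≤ (s : Int) ∧ rest.getD (((s : Int)) - ((s + 1 : Nat) : Int)).toNat "" = "E") := by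
          intro h; omega
        have h2 : ¬ ((s : Int) ≤ (s : Int) ∧ (c :: rest).getD 0 "" = "E") := by
          intro h; exact hc (by simpa [List.getD] using h.2)
        rw [if_neg h1, if_neg h2]
      · by_cases hle : (s : Int) + 1 ≤ q
        · have hn : (q - (s : Nat)).toNat = (q - ((s + 1 : Nat) : Int)).toNat + 1 := by omega
          rw [hn]
          simp only [List.getD_cons_succ]
          by_cases hE : rest.getD (q - ((s + 1 : Nat) : Int)).toNat "" = "E"
          · rw [if_pos ⟨by omega, hE⟩, if_pos ⟨by omega, hE⟩]
          · rw [if_neg (fun h => hE h.2), if_neg (fun h => hE h.2)]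
        · have h1 : ¬ (((s + 1 : Nat) : Int) ≤ q ∧ rest.getD (q - ((s + 1 : Nat) : Int)).toNat "" = "E") := by
            intro h; exact hle (by omega)
          have h2 : ¬ ((s : Int) ≤ q ∧ (c :: rest).getD (q - (s : Nat)).toNat "" = "E") := by
            intro h
            have : q = (s : Int) := by omega
            exact hq this
          rw [if_neg h1, if_neg h2]

theorem bmain (rows : List (List String)) :
    ∀ (k : Int) (coords : List (Int × Int)) (d : PySem.Dict Int Int),
    ((PySem.List.enumerate rows k).foldl altRowStep (coords, d)).1 =
      coords ++ specRows (fun n => d.getD (n : Int) 0) k rows := by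
  induction rows with
  | nil => intro k coords d; simp [PySem.List.enumerate_nil, specRows]
  | cons r rest ih =>
    intro k coords d
    rw [PySem.List.enumerate_cons, List.foldl_cons]
    have hstep : altRowStep (coords, d) (k, r) =
        (coords ++ rowOutFrom k (fun n => d.getD (n : Int) 0) r 0 0,
         (PySem.List.enumerate r (0 : Int)).foldl altColStep d) := by
      unfold altRowStep
      have h0 : ((0 : Nat) : Int) = (0 : Int) := by omega
      have := binner r k d 0 0 coords
      rw [h0] at this
      rw [this]
    rw [hstep, ih (k + 1)]
    have hcnt : (fun n : Nat => ((PySem.List.enumerate r (0 : Int)).foldl altColStep d).getD (n : Int) 0) =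
        bump (fun n : Nat => d.getD (n : Int) 0) r := by
      funext n
      have := colupd r 0 d (n : Int)
      have h0 : ((0 : Nat) : Int) = (0 : Int) := by omega
      rw [h0] at this
      rw [this]
      have h1 : (((n : Int)) - (0 : Int)).toNat = n := by omega
      rw [h1]
      simp [bump]
    rw [hcnt]
    simp [specRows]

theorem map_getD_range (l : List (List String)) (n : Nat) (h : n ≤ l.length) :
    (List.range n).map (fun x => l.getD x []) = l.take n := by
  apply List.ext_getElem
  · simp; omega
  · intro i h1 h2
    simp only [List.getElem_map, List.getElem_range, List.getElem_take]
    have hi : i < l.length := by simp at h1; omega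
    rw [List.getD_eq_getElem?_getD, List.getElem?_eq_getElem hi]
    rfl

theorem specRows_snoc (r : List String) :
    ∀ (rows : List (List String)) (cnt : Nat → Int) (k : Int),
    specRows cnt k (rows ++ [r]) =
      specRows cnt k rows ++
        rowOutFrom (k + rows.length)
          (fun j => cnt j + ((rows.map (fun ro => ro.getD j "")).count "E" : Int)) r 0 0 := by
  intro rows
  induction rows with
  | nil =>
    intro cnt k
    simp [specRows]
  | cons r0 rows ih =>
    intro cnt k
    show rowOutFrom k cnt r0 0 0 ++ specRows (bump cnt r0) (k + 1) (rows ++ [r]) = _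
    rw [ih (bump cnt r0) (k + 1)]
    have hk : (k + 1 + (rows.length : Int)) = k + (((r0 :: rows).length : Nat) : Int) := by
      simp; omega
    have hf : (fun j => bump cnt r0 j + ((rows.map (fun ro => ro.getD j "")).count "E" : Int)) =
        (fun j => cnt j + ((((r0 :: rows)).map (fun ro => ro.getD j "")).count "E" : Int)) := by
      funext j
      simp only [bump, List.map_cons, List.count_cons]
      by_cases hE : r0.getD j "" = "E"
      · have hE' : ((r0.getD j "") == "E") = true := by simpa using hE
        rw [if_pos hE, if_pos hE']
        omega
      · have hE' : ((r0.getD j "") == "E") = false := by simpa using hE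
        rw [if_neg hE, hE']
        simp
    rw [hk, hf]
    simp [specRows]

theorem afilter (i : Int) (cnt : Nat → Int) (r : List String) :
    ∀ (s e : Nat),
    ((List.range r.length).filter
        (fun j => decide (r.getD j "" = "#"))).map
      (fun j => (i + cnt (s + j) * 999998,
                 ((s + j : Nat) : Int) + ((e + (r.take j).count "E" : Nat) : Int) * 999998)) =
      rowOutFrom i cnt r s e := by
  induction r with
  | nil => intro s e; simp [rowOutFrom]
  | cons c rest ih =>
    intro s e
    rw [List.length_cons, List.range_succ_eq_map, List.filter_cons]
    have htail :
        (((List.range rest.length).map Nat.succ).filter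
            (fun j => decide ((c :: rest).getD j "" = "#"))).map
          (fun j => (i + cnt (s + j) * 999998,
                 ((s + j : Nat) : Int) + ((e + ((c :: rest).take j).count "E" : Nat) : Int) * 999998)) =
        rowOutFrom i cnt rest (s + 1) (e + if c = "E" then 1 else 0) := by
      rw [List.filter_map, List.map_map]
      have hp : ((fun j => decide ((c :: rest).getD j "" = "#")) ∘ Nat.succ) =
          (fun j => decide (rest.getD j "" = "#")) := by
        funext j; simp [List.getD_cons_succ]
      rw [hp]
      have hf : ((fun j => ((i + cnt (s + j) * 999998,
                 ((s + j : Nat) : Int) + ((e + ((c :: rest).take j).count "E" : Nat) : Int) * 999998) : Int × Int)) ∘ Nat.succ) =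
          (fun j => (i + cnt ((s + 1) + j) * 999998,
                 (((s + 1) + j : Nat) : Int) + (((e + if c = "E" then 1 else 0) + (rest.take j).count "E" : Nat) : Int) * 999998)) := by
        funext j
        simp only [Function.comp_apply, Nat.succ_eq_add_one]
        have h1 : s + (j + 1) = (s + 1) + j := by omega
        rw [List.take_succ_cons, List.count_cons, h1]
        have h2 : e + (List.count "E" (List.take j rest) + if (c == "E") = true then 1 else 0) =
            (e + if c = "E" then 1 else 0) + List.count "E" (List.take j rest) := by
          by_cases hcE : c = "E" <;> simp [hcE] <;> omega
        rw [h2]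
      rw [hf, ih (s + 1) (e + if c = "E" then 1 else 0)]
    by_cases hc : c = "#"
    · rw [if_pos (by simp [hc]), List.map_cons, htail]
      show _ = rowOutFrom i cnt (c :: rest) s e
      rw [rowOutFrom, if_pos hc]
      simp
    · rw [if_neg (by simp [hc]), htail]
      show _ = rowOutFrom i cnt (c :: rest) s e
      rw [rowOutFrom, if_neg hc]
      simp

theorem afilter0 (i : Int) (cnt : Nat → Int) (r : List String) :
    ((List.range r.length).filter
        (fun j => decide (r.getD j "" = "#"))).map
      (fun j => (i + cnt j * 999998,
                 ((j : Nat) : Int) + (((r.take j).count "E" : Nat) : Int) * 999998)) =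
      rowOutFrom i cnt r 0 0 := by
  have h := afilter i cnt r 0 0
  simpa using h


theorem amain (univ : List (List String)) :
    ∀ (n : Nat), n ≤ univ.length →
    (List.range n).foldl (fun coords i =>
      (List.range (univ.getD i []).length).foldl (fun coords j =>
        if (univ.getD i []).getD j "" = "#" then
          coords ++ [((i : Int) + (((List.range i).map (fun x => (univ.getD x []).getD j "")).count "E" : Int) * 999998,
                      (j : Int) + (((univ.getD i []).take j).count "E" : Int) * 999998)]
        else coords) coords) [] = specRows (fun _ => 0) 0 (univ.take n) := by
  intro n
  induction n with
  | zero => intro _; simp [specRows]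
  | succ n ih =>
    intro h
    rw [List.range_succ, List.foldl_append, ih (by omega), List.foldl_cons, List.foldl_nil]
    rw [PySem.List.foldl_append_ite
      (p := fun j => (univ.getD n []).getD j "" = "#")
      (f := fun j => (((n : Nat) : Int) + (((List.range n).map (fun x => (univ.getD x []).getD j "")).count "E" : Int) * 999998,
                      ((j : Nat) : Int) + (((univ.getD n []).take j).count "E" : Int) * 999998))]
    have hmr : (List.range n).map (fun x => univ.getD x []) = univ.take n :=
      map_getD_range univ n (by omega)
    have htake : univ.take (n + 1) = univ.take n ++ [univ.getD n []] := by
      rw [List.take_succ, List.getElem?_eq_getElem (by omega), List.getD_eq_getElem?_getD,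
        List.getElem?_eq_getElem (by omega)]
      rfl
    rw [htake, specRows_snoc]
    congr 1
    rw [afilter0 ((n : Nat) : Int) (fun j => (((List.range n).map (fun x => (univ.getD x []).getD j "")).count "E" : Int)) (univ.getD n [])]
    have hk0 : ((0 : Int) + (((univ.take n).length : Nat) : Int)) = ((n : Nat) : Int) := by
      have : (univ.take n).length = n := by simp; omega
      rw [this]
      omega
    rw [hk0]
    have hfun : (fun j : Nat => ((((List.range n).map (fun x => (univ.getD x []).getD j "")).count "E" : Nat) : Int)) =
        (fun j : Nat => (0 : Int) + ((((univ.take n).map (fun ro => ro.getD j "")).count "E" : Nat) : Int)) := by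
      funext j
      rw [← hmr, List.map_map]
      simp only [Int.zero_add]
      rfl
    rw [hfun]

-- ===== VERDICT (by name: the statement is the Claim_ definition above) =====
theorem get_coords2_spec : Claim_equal_get_coords2 := by
  intro univ _ _
  unfold Spec_get_coords2 get_coords2 get_coords2_alt
  rw [amain univ univ.length le_rfl, List.take_length, bmain univ 0 [] PySem.Dict.empty]
  have hf : (fun n : Nat => (PySem.Dict.empty : PySem.Dict Int Int).getD (n : Int) 0) =
      (fun _ : Nat => (0 : Int)) := by
    funext n; simp [PySem.Dict.getD_empty]
  rw [hf, List.nil_append]
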